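-- pv_equiv track=rewrite | github.com/yesl-kim/algorithm-python | answers/2/5. 정다면체/answer.py | solution
-- ===== SOURCE A (Python) =====
-- def solution(n, m):
--     a={}
--     for i in range(1, n+1):
--         for j in range(1, m+1):
--             sum=i+j
--             a[sum]=a.get(sum, 0)+1
--     b=max(list(a.values()))
--     s=[]
--     for x, y in list(a.items()):
--         if y==b:
--             s.append(str(x))
--     return " ".join(s)
-- ===== SOURCE B (Python) =====
-- def solution(n, m):
--     lo = min(n, m) + 1
--     hi = max(n, m) + 1
--     return " ".join(str(s) for s in range(lo, hi + 1))
-- ===== Notes on version B (the rewrite author's own statement) =====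
-- stated objective: faster
-- what changed: Replaces the O(n*m) dict of all dice-pair sums plus max scan with the closed-form trapezoidal distribution: the maximal count min(n,m) is attained exactly on the contiguous sums min(n,m)+1 .. max(n,m)+1, emitted directly.
import Mathlib
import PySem

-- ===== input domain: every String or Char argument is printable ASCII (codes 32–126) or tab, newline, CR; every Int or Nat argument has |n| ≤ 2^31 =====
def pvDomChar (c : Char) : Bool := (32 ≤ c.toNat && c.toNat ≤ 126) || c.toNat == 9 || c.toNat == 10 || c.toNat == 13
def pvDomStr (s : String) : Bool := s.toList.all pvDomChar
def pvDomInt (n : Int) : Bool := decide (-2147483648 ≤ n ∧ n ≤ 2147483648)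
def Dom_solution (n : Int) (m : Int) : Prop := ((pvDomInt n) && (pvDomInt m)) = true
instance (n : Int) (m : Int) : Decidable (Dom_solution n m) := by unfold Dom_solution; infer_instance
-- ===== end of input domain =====

-- B replaces A's O(n*m) dict of all dice-pair sums with the closed-form trapezoidal
-- distribution: the maximal count is attained exactly on the sums min(n,m)+1 .. max(n,m)+1.


-- ===== PORT A =====
def solution (n : Int) (m : Int) : String :=
  let a := (PySem.List.pyRange 1 (n+1) 1).foldl
    (fun a i => (PySem.List.pyRange 1 (m+1) 1).foldl
      (fun a j => a.insert (i+j) (a.getD (i+j) 0 + 1)) a)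
    (PySem.Dict.empty : PySem.Dict Int Int)
  -- max(list(a.values())) raises ValueError on the empty dict (n < 1 or m < 1); Pre_ excludes
  -- those inputs, so the .getD 0 default is never reached under Pre_.
  let b := (PySem.List.max? a.values (fun y => y)).getD 0
  let s := a.items.foldl (fun s xy => if xy.2 == b then s ++ [PySem.Int.toStr xy.1] else s)
    ([] : List String)
  PySem.Str.join " " s

-- ===== PORT B =====
def solution_alt (n : Int) (m : Int) : String :=
  let lo := min n m + 1
  let hi := max n m + 1
  PySem.Str.join " " ((PySem.List.pyRange lo (hi + 1) 1).map PySem.Int.toStr)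

-- ===== PRECONDITION & SPEC =====
-- Pre_ excludes exactly the inputs where A raises: for n < 1 or m < 1 the dict stays empty
-- and max([]) raises ValueError.
def Pre_solution (n : Int) (m : Int) : Prop := 1 ≤ n ∧ 1 ≤ m
instance (n : Int) (m : Int) : Decidable (Pre_solution n m) := by unfold Pre_solution; infer_instance
def pvWitness_solution : Int × Int := (4, 6)

def Spec_solution (n : Int) (m : Int) (out : String) : Prop := out = solution_alt n m
instance (n : Int) (m : Int) (out : String) : Decidable (Spec_solution n m out) := by unfold Spec_solution; infer_instance

-- ===== CLAIM (what is proved, stated in full; the proofs are below) =====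
def Claim_equal_solution : Prop := ∀ (n : Int) (m : Int), Dom_solution n m → Pre_solution n m → Spec_solution n m (solution n m)

-- ===== LEMMAS AND PROOFS =====

-- the multiset of sums i+j produced by A's nested loops, row by row
def pvRow (m i : Int) : List Int := PySem.List.pyRange (i+1) (i+m+1) 1
def pvSums (n m : Int) : List Int := (PySem.List.pyRange 1 (n+1) 1).flatMap (pvRow m)
-- the closed-form count of pairs (i,j), 1 ≤ i ≤ n, 1 ≤ j ≤ m, with i+j = k
def pvCnt (n m k : Int) : Int := max 0 (min (min (k-1) n) (min m (n+m+1-k)))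

lemma pvRow_eq_map (m i : Int) :
    (PySem.List.pyRange 1 (m+1) 1).map (fun j => i + j) = pvRow m i := by
  simp only [pvRow, PySem.List.pyRange_one]
  rw [List.map_map]
  have h1 : (m + 1 - 1).toNat = (i + m + 1 - (i + 1)).toNat := by omega
  rw [h1]
  apply List.map_congr_left
  intro x _
  simp; omega

lemma pvSums_succ (n m : Int) (hn : 0 ≤ n) :
    pvSums (n+1) m = pvSums n m ++ pvRow m (n+1) := by
  unfold pvSums
  have : (1 : Int) ≤ n + 1 := by omega
  rw [show n + 1 + 1 = (n + 1) + 1 from rfl, PySem.List.pyRange_one_succ_right this]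
  simp

lemma count_pyRange_one (a b k : Int) :
    ((PySem.List.pyRange a b 1).count k : Int) = if a ≤ k ∧ k < b then 1 else 0 := by
  split_ifs with h
  · exact_mod_cast List.count_eq_one_of_mem (PySem.List.nodup_pyRange_one a b)
      ((PySem.List.mem_pyRange_one).mpr h)
  · have : k ∉ PySem.List.pyRange a b 1 := by
      simp [PySem.List.mem_pyRange_one]; omega
    simp [List.count_eq_zero.mpr this]

lemma count_pvSums (m : Int) (hm : 1 ≤ m) :
    ∀ n : Int, 0 ≤ n → ∀ k, ((pvSums n m).count k : Int) = pvCnt n m k := by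
  intro n hn
  induction n, hn using Int.le_induction with
  | base =>
    intro k
    simp [pvSums]
    unfold pvCnt; omega
  | succ n hn ih =>
    intro k
    rw [pvSums_succ n m hn, List.count_append]
    push_cast
    rw [ih k, show pvRow m (n+1) = PySem.List.pyRange (n+2) (n+m+2) 1 by unfold pvRow; ring_nf,
      count_pyRange_one]
    unfold pvCnt
    split_ifs <;> omega

lemma update_of_forall_mem (s : PySem.Set Int) :
    ∀ xs : List Int, (∀ x ∈ xs, x ∈ s) → PySem.Set.update s xs = s := by
  intro xs
  induction xs generalizing s with
  | nil => intro _; rfl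
  | cons x t ih =>
    intro h
    have hx : x ∈ s := h x (by simp)
    show PySem.Set.update (PySem.Set.add s x) t = s
    rw [PySem.Set.add_of_mem hx]
    exact ih s (fun y hy => h y (by simp [hy]))

lemma keys_pvSums (m : Int) (hm : 1 ≤ m) :
    ∀ n : Int, 1 ≤ n → PySem.Set.ofList (pvSums n m) = PySem.List.pyRange 2 (n+m+1) 1 := by
  intro n hn
  induction n, hn using Int.le_induction with
  | base =>
    have h1 : pvSums 1 m = pvRow m 1 := by
      unfold pvSums
      rw [PySem.List.pyRange_one_singleton]
      simp
    rw [h1, show pvRow m 1 = PySem.List.pyRange 2 (1+m+1) 1 by unfold pvRow; ring_nf]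
    exact PySem.Set.ofList_eq_self_of_nodup _ (PySem.List.nodup_pyRange_one 2 (1+m+1))
  | succ n hn ih =>
    rw [pvSums_succ n m (by omega)]
    have hsplit : pvRow m (n+1) = PySem.List.pyRange (n+2) (n+m+1) 1 ++ [n+m+1] := by
      unfold pvRow
      rw [show n+1+m+1 = (n+m+1)+1 by ring, PySem.List.pyRange_one_succ_right (by omega)]
      ring_nf
    have hofl : ∀ xs ys : List Int,
        PySem.Set.ofList (xs ++ ys) = PySem.Set.update (PySem.Set.ofList xs) ys := by
      intro xs ys
      simp [PySem.Set.ofList_eq_foldl, PySem.Set.update, List.foldl_append]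
    rw [hofl, hsplit, ih]
    have hupd : PySem.Set.update (PySem.List.pyRange 2 (n+m+1) 1)
        (PySem.List.pyRange (n+2) (n+m+1) 1 ++ [n+m+1])
        = PySem.Set.add (PySem.List.pyRange 2 (n+m+1) 1) (n+m+1) := by
      show (PySem.List.pyRange (n+2) (n+m+1) 1 ++ [n+m+1]).foldl PySem.Set.add _ = _
      rw [List.foldl_append]
      rw [show (PySem.List.pyRange (n+2) (n+m+1) 1).foldl PySem.Set.add
            (PySem.List.pyRange 2 (n+m+1) 1) = PySem.List.pyRange 2 (n+m+1) 1 from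
        update_of_forall_mem _ _ (by
          intro x hx
          rw [PySem.List.mem_pyRange_one] at hx ⊢
          omega)]
      rfl
    rw [hupd, PySem.Set.add_of_not_mem (by rw [PySem.List.mem_pyRange_one]; omega),
      show n+1+m+1 = (n+m+1)+1 by ring,
      PySem.List.pyRange_one_succ_right (a := 2) (b := n+m+1) (by omega)]

-- A's nested insert loops build exactly Counter(pvSums n m)
lemma dict_eq_counter (n m : Int) :
    (PySem.List.pyRange 1 (n+1) 1).foldl
      (fun a i => (PySem.List.pyRange 1 (m+1) 1).foldl
        (fun a j => a.insert (i+j) (a.getD (i+j) 0 + 1)) a)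
      (PySem.Dict.empty : PySem.Dict Int Int)
    = PySem.Dict.counter (pvSums n m) := by
  rw [← PySem.Dict.foldl_insert_getD_add_one_eq_counter]
  unfold pvSums
  rw [List.foldl_flatMap]
  apply PySem.List.foldl_congr_mem
  intro acc i _
  rw [← pvRow_eq_map m i, List.foldl_map]

lemma filter_pyRange_interval (a b lo hi : Int) (p : Int → Bool)
    (h1 : a ≤ lo) (h2 : lo ≤ hi + 1) (h3 : hi + 1 ≤ b)
    (hp : ∀ k, a ≤ k → k < b → (p k = true ↔ lo ≤ k ∧ k ≤ hi)) :
    (PySem.List.pyRange a b 1).filter p = PySem.List.pyRange lo (hi+1) 1 := by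
  rw [PySem.List.pyRange_one_append a lo b (by omega) (by omega),
    PySem.List.pyRange_one_append lo (hi+1) b (by omega) (by omega)]
  rw [List.filter_append, List.filter_append]
  rw [List.filter_eq_nil_iff.mpr (by
      intro k hk
      rw [PySem.List.mem_pyRange_one] at hk
      simp only [Bool.not_eq_true]
      rw [← Bool.not_eq_true, hp k (by omega) (by omega)]
      omega)]
  rw [List.filter_eq_self.mpr (by
      intro k hk
      rw [PySem.List.mem_pyRange_one] at hk
      rw [hp k (by omega) (by omega)]
      omega)]
  rw [List.filter_eq_nil_iff.mpr (by
      intro k hk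
      rw [PySem.List.mem_pyRange_one] at hk
      simp only [Bool.not_eq_true]
      rw [← Bool.not_eq_true, hp k (by omega) (by omega)]
      omega)]
  simp

-- the maximum of the counts over the keys 2 .. n+m is min n m
lemma max_counts (n m : Int) (hn : 1 ≤ n) (hm : 1 ≤ m) (b : Int)
    (hb : PySem.List.max? ((PySem.List.pyRange 2 (n+m+1) 1).map (pvCnt n m)) (fun y => y)
          = some b) :
    b = min n m := by
  have hmem := PySem.List.max?_mem hb
  have hmax := PySem.List.max?_isMax hb
  simp only [List.mem_map, PySem.List.mem_pyRange_one] at hmem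
  obtain ⟨k, hk, hbk⟩ := hmem
  have hble : b ≤ min n m := by subst hbk; unfold pvCnt; omega
  have hin : pvCnt n m (min n m + 1) ∈
      (PySem.List.pyRange 2 (n+m+1) 1).map (pvCnt n m) := by
    simp only [List.mem_map, PySem.List.mem_pyRange_one]
    exact ⟨min n m + 1, by omega, rfl⟩
  have := hmax _ hin
  have hval : pvCnt n m (min n m + 1) = min n m := by unfold pvCnt; omega
  simp only [hval] at this
  omega

-- ===== VERDICT (by name: the statement is the Claim_ definition above) =====
theorem solution_spec : Claim_equal_solution := by
  intro n m _ hpre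
  obtain ⟨hn, hm⟩ := hpre
  unfold Spec_solution solution solution_alt
  simp only
  rw [dict_eq_counter n m]
  -- items / values of the counter
  have hkeys := keys_pvSums m hm n hn
  have hcnt := count_pvSums m hm n (by omega)
  have hitems : (PySem.Dict.counter (pvSums n m)).items
      = (PySem.List.pyRange 2 (n+m+1) 1).map (fun k => (k, pvCnt n m k)) := by
    rw [PySem.Dict.items_counter, hkeys]
    apply List.map_congr_left
    intro k _
    rw [hcnt k]
  have hvalues : (PySem.Dict.counter (pvSums n m)).values
      = (PySem.List.pyRange 2 (n+m+1) 1).map (pvCnt n m) := by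
    show (PySem.Dict.counter (pvSums n m)).items.map (·.2) = _
    rw [hitems, List.map_map]
    rfl
  rw [hitems, hvalues]
  -- the max of the values is min n m
  have hne : (PySem.List.pyRange 2 (n+m+1) 1).map (pvCnt n m) ≠ [] := by
    simp only [ne_eq, List.map_eq_nil_iff]
    intro h
    have : (2:Int) ∈ PySem.List.pyRange 2 (n+m+1) 1 :=
      PySem.List.mem_pyRange_one.mpr (by omega)
    rw [h] at this
    exact absurd this (List.not_mem_nil)
  obtain ⟨b, hb⟩ := Option.ne_none_iff_exists'.mp
    (mt (PySem.List.max?_eq_none_iff _ (fun y => y)).mp hne)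
  have hbval : b = min n m := max_counts n m hn hm b hb
  have hbv : (PySem.List.max? ((PySem.List.pyRange 2 (n+m+1) 1).map (pvCnt n m))
      (fun y => y)).getD 0 = min n m := by
    rw [hb, Option.getD_some, hbval]
  rw [hbv]
  -- the filtering loop
  have hfold := PySem.List.foldl_append_if (p := fun xy : Int × Int => xy.2 == min n m)
      (f := fun xy : Int × Int => PySem.Int.toStr xy.1)
      (l := (PySem.List.pyRange 2 (n+m+1) 1).map (fun k => (k, pvCnt n m k))) (acc := [])
  simp only [List.nil_append] at hfold
  rw [hfold]
  rw [List.filter_map, List.map_map]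
  rw [show ((fun xy : Int × Int => xy.2 == min n m) ∘ fun k => (k, pvCnt n m k))
        = fun k => pvCnt n m k == min n m from rfl]
  rw [filter_pyRange_interval 2 (n+m+1) (min n m + 1) (max n m + 1)
      _ (by omega) (by omega) (by omega)
      (by
        intro k h2 hlt
        simp only [beq_iff_eq]
        unfold pvCnt
        omega)]
  rfl
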